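-- pv_equiv track=rewrite | github.com/fishellVvv/MPO_projects_python | retos_programacion/retos_online/adventofcode_25/day01.py | day01
-- ===== SOURCE A (Python) =====
-- def day01(input):
--     result = 0
--     base = 50
--
--     for line in input:
--         num = int(line[1:])
--         if line[0] == "R":
--             base = (base + num) % 100
--         else:
--             base = (base - num) % 100
--
--         if base == 0:
--             result += 1
--
--     return result
-- ===== SOURCE B (Python) =====
-- def day01(input):
--     # divide-and-conquer: each segment yields (its delta-sum mod 100, residues mod 100
--     # of its nonempty prefix sums); merging shifts the right half's residues by the
--     # left sum; a hit (base 0) is a prefix-sum residue of 50, so the answer is the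
--     # count of 50 among the whole list's residues.
--     if not input:
--         return 0
--     _, residues = _go(input)
--     return residues.count(50)
--
-- def _go(lines):
--     if len(lines) == 1:
--         line = lines[0]
--         num = int(line[1:])
--         d = num if line[0] == "R" else -num
--         r = d % 100
--         return r, [r]
--     mid = len(lines) // 2
--     sL, rL = _go(lines[:mid])
--     sR, rR = _go(lines[mid:])
--     return (sL + sR) % 100, rL + [(sL + r) % 100 for r in rR]
-- ===== Notes on version B (the rewrite author's own statement) =====
-- stated objective: alternative
-- what changed: B replaces A's single sequential loop with a divide-and-conquer: each half yields (delta-sum mod 100, residues of its prefix sums), halves are merged by shifting the right residues by the left sum, and the answer is the count of residue 50.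
import Mathlib
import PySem

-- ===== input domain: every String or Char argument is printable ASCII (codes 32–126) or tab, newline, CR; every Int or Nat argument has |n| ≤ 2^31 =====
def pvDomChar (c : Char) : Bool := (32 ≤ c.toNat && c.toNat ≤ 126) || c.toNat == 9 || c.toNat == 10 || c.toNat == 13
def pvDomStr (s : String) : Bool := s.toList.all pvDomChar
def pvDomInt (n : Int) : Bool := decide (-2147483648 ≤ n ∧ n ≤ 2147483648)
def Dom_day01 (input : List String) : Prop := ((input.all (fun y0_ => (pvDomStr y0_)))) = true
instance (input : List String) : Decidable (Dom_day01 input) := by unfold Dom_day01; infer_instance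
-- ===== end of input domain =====

-- B: a divide-and-conquer over the line list (merge of residue lists) instead of A's sequential loop; no speed claim.

-- ===== PORT A =====
-- one loop step of A: state = (result, base); Pre_ guarantees int(line[1:]) parses, so getD 0 is never read
def day01Step (st : Int × Int) (line : String) : Int × Int :=
  let num := (PySem.Int.ofChars? (PySem.List.slice line.toList (some 1) none)).getD 0
  let base := if PySem.Chars.pyGet? line.toList 0 = some 'R'
              then PySem.Int.mod (st.2 + num) 100
              else PySem.Int.mod (st.2 - num) 100
  (st.1 + (if base = 0 then 1 else 0), base)

def day01 (input : List String) : Int :=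
  (input.foldl day01Step (0, 50)).1

-- ===== PORT B =====
-- the signed delta of one line: +int(line[1:]) for 'R', else -int(line[1:]) (Pre_ makes the parse succeed)
def day01Delta (line : String) : Int :=
  let num := (PySem.Int.ofChars? (PySem.List.slice line.toList (some 1) none)).getD 0
  if PySem.Chars.pyGet? line.toList 0 = some 'R' then num else -num

-- _go of Source B: (delta-sum mod 100, residues mod 100 of the segment's nonempty prefix sums).
-- Source B is only ever called on nonempty segments; the [] branch just makes the recursion total.
def day01Go (lines : List String) : Int × List Int :=
  if _h : lines.length ≤ 1 then
    match lines with
    | [] => (0, [])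
    | [line] =>
      let d := day01Delta line
      let r := PySem.Int.mod d 100
      (r, [r])
  else
    let mid := lines.length / 2
    let L := day01Go (lines.take mid)
    let R := day01Go (lines.drop mid)
    (PySem.Int.mod (L.1 + R.1) 100, L.2 ++ R.2.map (fun r => PySem.Int.mod (L.1 + r) 100))
termination_by lines.length
decreasing_by
  · simp only [List.length_take]; omega
  · simp only [List.length_drop]; omega

def day01_alt (input : List String) : Int :=
  if input = [] then 0
  else ((PySem.List.count (day01Go input).2 (50 : Int) : Nat) : Int)

-- ===== PRECONDITION & SPEC =====
-- Pre_ excludes exactly the inputs where A raises: a line whose tail is not a valid int literal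
-- (this also covers the empty line: int('') raises before line[0] is read).
def Pre_day01 (input : List String) : Prop :=
  (input.all (fun s => (PySem.Int.ofChars? (s.toList.drop 1)).isSome)) = true
instance (input : List String) : Decidable (Pre_day01 input) := by unfold Pre_day01; infer_instance
def pvWitness_day01 : List String := (["R50", "L100", "R1", "L1"])

def Spec_day01 (input : List String) (out : Int) : Prop := out = day01_alt input
instance (input : List String) (out : Int) : Decidable (Spec_day01 input out) := by unfold Spec_day01; infer_instance

-- ===== CLAIM (what is proved, stated in full; the proofs are below) =====
def Claim_equal_day01 : Prop := ∀ (input : List String), Dom_day01 input → Pre_day01 input → Spec_day01 input (day01 input)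

-- ===== LEMMAS AND PROOFS =====

-- prefix sums of a delta list, starting from b (one entry per delta)
def pvPsums (b : Int) : List Int → List Int
  | [] => []
  | d :: t => (b + d) :: pvPsums (b + d) t

lemma pvPsums_append (b : Int) (L R : List Int) :
    pvPsums b (L ++ R) = pvPsums b L ++ pvPsums (b + L.sum) R := by
  induction L generalizing b with
  | nil => simp [pvPsums]
  | cons d t ih => simp [pvPsums, ih, add_assoc]

lemma pvPsums_shift (c b : Int) (l : List Int) :
    pvPsums (c + b) l = (pvPsums b l).map (c + ·) := by
  induction l generalizing b with
  | nil => simp [pvPsums]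
  | cons d t ih => simp [pvPsums, ← ih, add_assoc]

lemma pvMod_add_mod (a b : Int) :
    PySem.Int.mod (PySem.Int.mod a 100 + PySem.Int.mod b 100) 100 = PySem.Int.mod (a + b) 100 := by
  have h : ∀ a : Int, PySem.Int.mod a 100 = a % 100 :=
    fun a => PySem.Int.mod_eq_emod_of_pos (by norm_num)
  rw [h, h, h, h]; omega

-- characterisation of Source B's _go on nonempty segments
lemma day01Go_spec : ∀ (n : Nat) (ls : List String), ls.length = n → ls ≠ [] →
    day01Go ls = (PySem.Int.mod (ls.map day01Delta).sum 100,
                  (pvPsums 0 (ls.map day01Delta)).map (fun p => PySem.Int.mod p 100)) := by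
  intro n
  induction n using Nat.strong_induction_on with
  | _ n ih =>
    intro ls hlen hne
    rw [day01Go]
    by_cases h1 : ls.length ≤ 1
    · match ls, hne with
      | [line], _ => simp [pvPsums]
    · simp only [dif_neg h1]
      have h2 : 2 ≤ ls.length := by omega
      set m := ls.length / 2 with hm
      have hmlt : m < ls.length := by omega
      have hm1 : 1 ≤ m := by omega
      have htake : (ls.take m).length = m := by simp; omega
      have hdrop : (ls.drop m).length = ls.length - m := by simp
      rw [ih (ls.take m).length (by omega) _ rfl (by intro hc; rw [hc] at htake; simp at htake; omega),
          ih (ls.drop m).length (by rw [hdrop]; omega) _ rfl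
            (by intro hc; rw [hc] at hdrop; simp at hdrop; omega)]
      have hsplit : ls.map day01Delta = (ls.take m).map day01Delta ++ (ls.drop m).map day01Delta := by
        rw [← List.map_append, List.take_append_drop]
      refine Prod.ext ?_ ?_ <;> dsimp only
      · rw [hsplit, List.sum_append, pvMod_add_mod]
      · rw [hsplit, pvPsums_append, List.map_append]
        congr 1
        have hsh : pvPsums ((ls.take m).map day01Delta).sum ((ls.drop m).map day01Delta)
            = (pvPsums 0 ((ls.drop m).map day01Delta)).map (((ls.take m).map day01Delta).sum + ·) := by
          simpa using pvPsums_shift ((ls.take m).map day01Delta).sum 0 ((ls.drop m).map day01Delta)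
        rw [zero_add, hsh]
        simp only [List.map_map]
        apply List.map_congr_left
        intro p _
        simp only [Function.comp]
        rw [pvMod_add_mod]

-- A's step from base (t mod 100): new base is the next prefix total mod 100, counted iff it is 0
lemma day01_step_eq (r t : Int) (line : String) :
    day01Step (r, PySem.Int.mod t 100) line
      = (r + (if PySem.Int.mod (t + day01Delta line) 100 = 0 then (1:Int) else 0),
         PySem.Int.mod (t + day01Delta line) 100) := by
  have h100 : ∀ a : Int, PySem.Int.mod a 100 = a % 100 :=
    fun a => PySem.Int.mod_eq_emod_of_pos (by norm_num)
  simp only [day01Step, day01Delta]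
  set n := (PySem.Int.ofChars? (PySem.List.slice line.toList (some 1) none)).getD 0 with hn
  have hkey : (if PySem.Chars.pyGet? line.toList 0 = some 'R'
                then PySem.Int.mod (PySem.Int.mod t 100 + n) 100
                else PySem.Int.mod (PySem.Int.mod t 100 - n) 100)
      = PySem.Int.mod (t + (if PySem.Chars.pyGet? line.toList 0 = some 'R' then n else -n)) 100 := by
    split_ifs with hC <;> rw [h100, h100, h100] <;> omega
  rw [hkey]
  simp only [← hn]

-- loop invariant: A's fold from (r, t mod 100) counts the prefix totals from t that are ≡ 0 mod 100
lemma day01_loop (lines : List String) : ∀ (r t : Int),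
    (lines.foldl day01Step (r, PySem.Int.mod t 100)).1
      = r + ((pvPsums t (lines.map day01Delta)).countP (fun x => PySem.Int.mod x 100 = 0) : Int) := by
  induction lines with
  | nil => intro r t; simp [pvPsums]
  | cons line rest ih =>
    intro r t
    simp only [List.foldl_cons, List.map_cons, pvPsums, List.countP_cons]
    rw [day01_step_eq, ih]
    simp only [decide_eq_true_eq]
    split_ifs <;> push_cast <;> ring

-- ===== VERDICT (by name: the statement is the Claim_ definition above) =====
theorem day01_spec : Claim_equal_day01 := by
  intro input _ _
  show day01 input = day01_alt input
  rcases eq_or_ne input [] with h | h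
  · simp [h, day01, day01_alt]
  · rw [day01, day01_alt, if_neg h,
        show ((0:Int), (50:Int)) = ((0:Int), PySem.Int.mod 50 100) from by decide,
        day01_loop input 0 50, zero_add,
        day01Go_spec input.length input rfl h]
    have h50 : pvPsums (50:Int) (input.map day01Delta)
        = (pvPsums 0 (input.map day01Delta)).map ((50:Int) + ·) := by
      simpa using pvPsums_shift (50:Int) 0 (input.map day01Delta)
    rw [h50]
    simp only [PySem.List.count_eq, List.count_eq_countP, List.countP_map]
    congr 1
    apply List.countP_congr
    intro p _
    have h100 : ∀ a : Int, PySem.Int.mod a 100 = a % 100 :=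
      fun a => PySem.Int.mod_eq_emod_of_pos (by norm_num)
    simp only [Function.comp, h100, beq_iff_eq, decide_eq_true_eq]
    omega
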